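-- pv_equiv track=rewrite | github.com/Anekantjainsagar/triaging_template | backend/predictions/enhanced_backend.py | _generate_attack_narrative
-- ===== SOURCE A (Python) =====
-- from typing import Dict, List, Any, Optional
--
-- def _generate_attack_narrative(techniques: List[Dict]) -> str:
--     """Generate coherent attack chain narrative"""
--
--     if not techniques:
--         return "No clear attack pattern identified from available evidence."
--
--     narrative_parts = []
--
--     # Sort techniques by tactic order
--     tactic_order = ["Initial Access", "Execution", "Persistence", "Privilege Escalation",
--                    "Defense Evasion", "Credential Access", "Discovery", "Lateral Movement",
--                    "Collection", "Command and Control", "Exfiltration", "Impact"]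
--
--     sorted_techniques = sorted(techniques, key=lambda x: tactic_order.index(x.get("tactic", "")) if x.get("tactic") in tactic_order else 999)
--
--     for i, technique in enumerate(sorted_techniques, 1):
--         tactic = technique.get("tactic", "Unknown")
--         tech_name = technique.get("technique", "Unknown")
--         evidence = technique.get("evidence", "")
--
--         narrative_parts.append(
--             f"Stage {i} ({tactic}): The attacker employed {tech_name} technique. "
--             f"Evidence suggests {evidence[:100]}..."
--         )
--
--     return " ".join(narrative_parts)
-- ===== SOURCE B (Python) =====
-- def _generate_attack_narrative(techniques):
--     """Generate coherent attack chain narrative (bucket grouping instead of sorting)"""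
--
--     if not techniques:
--         return "No clear attack pattern identified from available evidence."
--
--     tactic_order = ["Initial Access", "Execution", "Persistence", "Privilege Escalation",
--                    "Defense Evasion", "Credential Access", "Discovery", "Lateral Movement",
--                    "Collection", "Command and Control", "Exfiltration", "Impact"]
--
--     # group by tactic: one pass per tactic keeps input order inside each group,
--     # techniques with an unknown tactic come last, also in input order
--     ordered = [t for tac in tactic_order for t in techniques if t.get("tactic") == tac]
--     ordered += [t for t in techniques if t.get("tactic") not in tactic_order]
--
--     parts = [
--         f"Stage {i} ({t.get('tactic', 'Unknown')}): The attacker employed {t.get('technique', 'Unknown')} technique. "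
--         f"Evidence suggests {t.get('evidence', '')[:100]}..."
--         for i, t in enumerate(ordered, 1)
--     ]
--     return " ".join(parts)
-- ===== Notes on version B (the rewrite author's own statement) =====
-- stated objective: alternative
-- what changed: Replaces the stable comparison sort by tactic index with direct bucket grouping: techniques are collected per tactic in tactic_order (unknown tactics last), preserving input order within each group, then formatted with a running stage counter.
import Mathlib
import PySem

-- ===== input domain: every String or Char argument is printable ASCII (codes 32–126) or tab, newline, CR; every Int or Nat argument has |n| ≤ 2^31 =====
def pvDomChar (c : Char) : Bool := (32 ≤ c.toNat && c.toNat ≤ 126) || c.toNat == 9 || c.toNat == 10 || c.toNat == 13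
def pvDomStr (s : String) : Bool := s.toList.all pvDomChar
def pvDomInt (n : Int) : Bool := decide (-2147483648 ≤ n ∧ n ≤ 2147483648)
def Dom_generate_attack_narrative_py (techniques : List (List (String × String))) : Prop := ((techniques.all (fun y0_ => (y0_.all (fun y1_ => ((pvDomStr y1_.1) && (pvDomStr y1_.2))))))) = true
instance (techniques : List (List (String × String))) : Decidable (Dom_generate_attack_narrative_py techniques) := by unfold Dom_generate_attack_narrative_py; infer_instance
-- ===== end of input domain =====

-- B replaces A's stable sort by tactic index with per-tactic bucket grouping (unknown tactics last); same return value.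

def pvTacticOrder : List String :=
  ["Initial Access", "Execution", "Persistence", "Privilege Escalation",
   "Defense Evasion", "Credential Access", "Discovery", "Lateral Movement",
   "Collection", "Command and Control", "Exfiltration", "Impact"]

-- ===== PORT A =====
-- A's sort key: tactic_order.index(x.get("tactic", "")) if x.get("tactic") in tactic_order else 999
def pvKeyA (t : List (String × String)) : Nat :=
  match PySem.Dict.get? (PySem.Dict.mk t) "tactic" with
  | some s => if pvTacticOrder.contains s then (PySem.List.index? pvTacticOrder s).getD 999 else 999
  | none => 999

-- the body of A's formatting loop, step for step
def pvFmtA (i : Int) (t : List (String × String)) : String :=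
  let d := PySem.Dict.mk t
  let tactic := d.getD "tactic" "Unknown"
  let techName := d.getD "technique" "Unknown"
  let evidence := d.getD "evidence" ""
  "Stage " ++ PySem.Int.toStr i ++ " (" ++ tactic ++ "): The attacker employed " ++
    techName ++ " technique. Evidence suggests " ++
    PySem.Str.slice evidence none (some 100) ++ "..."

def generate_attack_narrative_py (techniques : List (List (String × String))) : String :=
  if techniques = [] then "No clear attack pattern identified from available evidence."
  else
    let sortedTechniques := PySem.List.sorted techniques pvKeyA false
    let narrativeParts :=
      (PySem.List.enumerate sortedTechniques 1).foldl (fun acc p => acc ++ [pvFmtA p.1 p.2]) []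
    PySem.Str.join " " narrativeParts

-- ===== PORT B =====
def pvGetTactic (t : List (String × String)) : Option String :=
  PySem.Dict.get? (PySem.Dict.mk t) "tactic"

-- B's 'not in tactic_order' test
def pvUnknownTactic (t : List (String × String)) : Bool :=
  !(match pvGetTactic t with
    | some s => pvTacticOrder.contains s
    | none => false)

-- B's comprehension body, one inline expression
def pvFmtB (i : Int) (t : List (String × String)) : String :=
  "Stage " ++ PySem.Int.toStr i ++ " (" ++ (PySem.Dict.mk t).getD "tactic" "Unknown" ++
    "): The attacker employed " ++ (PySem.Dict.mk t).getD "technique" "Unknown" ++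
    " technique. Evidence suggests " ++
    PySem.Str.slice ((PySem.Dict.mk t).getD "evidence" "") none (some 100) ++ "..."

def generate_attack_narrative_py_alt (techniques : List (List (String × String))) : String :=
  if techniques = [] then "No clear attack pattern identified from available evidence."
  else
    let ordered :=
      pvTacticOrder.flatMap (fun tac => techniques.filter (fun t => pvGetTactic t == some tac)) ++
        techniques.filter pvUnknownTactic
    PySem.Str.join " " ((PySem.List.enumerate ordered 1).map (fun p => pvFmtB p.1 p.2))

-- ===== PRECONDITION & SPEC =====
def Spec_generate_attack_narrative_py (techniques : List (List (String × String))) (out : String) : Prop := out = generate_attack_narrative_py_alt techniques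
instance (techniques : List (List (String × String))) (out : String) : Decidable (Spec_generate_attack_narrative_py techniques out) := by unfold Spec_generate_attack_narrative_py; infer_instance

-- ===== CLAIM (what is proved, stated in full; the proofs are below) =====
def Claim_equal_generate_attack_narrative_py : Prop := ∀ (techniques : List (List (String × String))), Dom_generate_attack_narrative_py techniques → Spec_generate_attack_narrative_py techniques (generate_attack_narrative_py techniques)

-- ===== LEMMAS AND PROOFS =====

-- the two loop bodies format identically
lemma pvFmt_eq : pvFmtA = pvFmtB := by
  funext i t
  simp [pvFmtA, pvFmtB]

-- insertBy drops x between a prefix of non-before elements and a suffix of before elements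
lemma pv_insertBy_middle {α : Type} (before : α → α → Bool) (x : α) (A B : List α)
    (hA : ∀ y ∈ A, before x y = false) (hB : ∀ y ∈ B, before x y = true) :
    PySem.List.insertBy before x (A ++ B) = A ++ x :: B := by
  induction A with
  | nil =>
    cases B with
    | nil => rfl
    | cons b bs => simp [PySem.List.insertBy, hB b (by simp)]
  | cons a as ih =>
    have ha : before x a = false := hA a (by simp)
    simp only [List.cons_append, PySem.List.insertBy, ha, Bool.false_eq_true, if_false]
    rw [ih (fun y hy => hA y (by simp [hy]))]

-- flatMap of per-key filters is unchanged by an element whose key is not in the list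
lemma pv_flatMap_skip {α : Type} (key : α → Nat) (x : α) (xs : List α) (l : List Nat)
    (h : ∀ k ∈ l, key x ≠ k) :
    l.flatMap (fun k => (xs ++ [x]).filter (fun y => key y == k)) =
      l.flatMap (fun k => xs.filter (fun y => key y == k)) := by
  induction l with
  | nil => rfl
  | cons k ks ih =>
    have h0 : (List.filter (fun y => key y == k) [x]) = [] := by
      have hne : (key x == k) = false := by simpa using h k (by simp)
      simp [List.filter, hne]
    simp only [List.flatMap_cons]
    rw [ih (fun k' hk' => h k' (by simp [hk'])), List.filter_append, h0, List.append_nil]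

-- stable sort by a Nat key whose values all lie in a strictly increasing list ks
-- equals the concatenation of the per-key filters in ks order
lemma pv_sorted_eq_buckets {α : Type} (key : α → Nat) (ks : List Nat)
    (hks : ks.Pairwise (· < ·)) (xs : List α) (hcov : ∀ x ∈ xs, key x ∈ ks) :
    PySem.List.sorted xs key false = ks.flatMap (fun k => xs.filter (fun x => key x == k)) := by
  induction xs using List.reverseRecOn with
  | nil => simp [PySem.List.sorted_eq_foldl_insertBy]
  | append_singleton xs x ih =>
    have hx : key x ∈ ks := hcov x (by simp)
    obtain ⟨ks₁, ks₂, hsplit⟩ := List.append_of_mem hx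
    have hcov' : ∀ y ∈ xs, key y ∈ ks := fun y hy => hcov y (by simp [hy])
    rw [PySem.List.sorted_eq_foldl_insertBy, List.foldl_append, List.foldl_cons, List.foldl_nil,
      ← PySem.List.sorted_eq_foldl_insertBy, ih hcov']
    subst hsplit
    have hpw := hks
    rw [List.pairwise_append] at hpw
    obtain ⟨hp1, hp2, hcross⟩ := hpw
    have hlt1 : ∀ k ∈ ks₁, k < key x := fun k hk => hcross k hk (key x) (by simp)
    have hlt2 : ∀ k ∈ ks₂, key x < k := by
      intro k hk
      exact (List.pairwise_cons.mp hp2).1 k hk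
    -- LHS: insert x after the ks₁-buckets and the key-x bucket, before the ks₂-buckets
    rw [List.flatMap_append, List.flatMap_cons, ← List.append_assoc]
    rw [pv_insertBy_middle _ x
      (ks₁.flatMap (fun k => xs.filter (fun y => key y == k)) ++ xs.filter (fun y => key y == key x))
      (ks₂.flatMap (fun k => xs.filter (fun y => key y == k)))
      (by
        intro y hy
        simp only [List.mem_append, List.mem_flatMap, List.mem_filter] at hy
        have hle : key y ≤ key x := by
          rcases hy with ⟨k, hk, -, hkey⟩ | ⟨-, hkey⟩
          · have h1 := hlt1 k hk
            have h2 : key y = k := by simpa using hkey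
            omega
          · have h2 : key y = key x := by simpa using hkey
            omega
        simp [Nat.not_lt.mpr hle])
      (by
        intro y hy
        simp only [List.mem_flatMap, List.mem_filter] at hy
        obtain ⟨k, hk, _, hkey⟩ := hy
        have : key y = k := by simpa using hkey
        have := hlt2 k hk
        simp; omega)]
    -- RHS: filters over xs ++ [x]
    rw [List.flatMap_append, List.flatMap_cons]
    rw [pv_flatMap_skip key x xs ks₁ (fun k hk => by have := hlt1 k hk; omega)]
    rw [pv_flatMap_skip key x xs ks₂ (fun k hk => by have := hlt2 k hk; omega)]
    rw [List.filter_append]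
    have : (List.filter (fun y => key y == key x) [x]) = [x] := by simp [List.filter]
    rw [this]
    simp [List.append_assoc]

def pvKs : List Nat := [0, 1, 2, 3, 4, 5, 6, 7, 8, 9, 10, 11, 999]

lemma pv_key_cov (t : List (String × String)) : pvKeyA t ∈ pvKs := by
  unfold pvKeyA
  cases hg : PySem.Dict.get? (PySem.Dict.mk t) "tactic" with
  | none => decide
  | some s =>
    by_cases hc : pvTacticOrder.contains s = true
    · simp only [hc, if_true]
      have hmem : s ∈ pvTacticOrder := by simpa using hc
      obtain ⟨i, hi⟩ := Option.isSome_iff_exists.mp ((PySem.List.index?_isSome_iff _ _).mpr hmem)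
      obtain ⟨hk, -, -⟩ := PySem.List.getElem_of_index?_eq_some hi
      rw [hi]
      simp only [Option.getD_some]
      have h12 : i < 12 := by simpa [pvTacticOrder] using hk
      interval_cases i <;> decide
    · have hs : s ∉ pvTacticOrder := by simpa using hc
      simp [hs, pvKs]

-- for an in-order tactic: "key equals its index" is "the tactic field equals that tactic"
lemma pv_point (tac : String) (i : Nat) (h : PySem.List.index? pvTacticOrder tac = some i)
    (t : List (String × String)) :
    ((pvKeyA t == i) : Bool) = (pvGetTactic t == some tac) := by
  obtain ⟨hk, heq, -⟩ := PySem.List.getElem_of_index?_eq_some h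
  have h12 : i < 12 := by simpa [pvTacticOrder] using hk
  unfold pvKeyA pvGetTactic
  cases hg : PySem.Dict.get? (PySem.Dict.mk t) "tactic" with
  | none =>
    simp
    omega
  | some s =>
    by_cases hc : pvTacticOrder.contains s = true
    · simp only [hc, if_true]
      have hmem : s ∈ pvTacticOrder := by simpa using hc
      obtain ⟨j, hj⟩ := Option.isSome_iff_exists.mp ((PySem.List.index?_isSome_iff _ _).mpr hmem)
      obtain ⟨hjk, hjeq, -⟩ := PySem.List.getElem_of_index?_eq_some hj
      rw [hj]
      simp only [Option.getD_some, Option.some_beq_some]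
      by_cases hst : s = tac
      · subst hst
        rw [h] at hj
        simp_all
      · have hji : j ≠ i := by
          intro hji; subst hji
          exact hst (hjeq.symm.trans heq)
        simp [hji, hst]
    · have hs : s ∉ pvTacticOrder := by simpa using hc
      have hst : s ≠ tac := by
        intro hst; subst hst
        exact hs (heq ▸ List.getElem_mem hk)
      simp [hs, hst]
      omega

-- key 999 is exactly B's "tactic not in tactic_order" test
lemma pv_point999 (t : List (String × String)) :
    ((pvKeyA t == 999) : Bool) = pvUnknownTactic t := by
  unfold pvKeyA pvUnknownTactic pvGetTactic
  cases hg : PySem.Dict.get? (PySem.Dict.mk t) "tactic" with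
  | none => simp
  | some s =>
    by_cases hc : pvTacticOrder.contains s = true
    · simp only [hc, if_true]
      have hmem : s ∈ pvTacticOrder := by simpa using hc
      obtain ⟨j, hj⟩ := Option.isSome_iff_exists.mp ((PySem.List.index?_isSome_iff _ _).mpr hmem)
      obtain ⟨hjk, -, -⟩ := PySem.List.getElem_of_index?_eq_some hj
      have h12 : j < 12 := by simpa [pvTacticOrder] using hjk
      rw [hj]
      simp [Nat.ne_of_lt (by omega : j < 999)]
    · have hs : s ∉ pvTacticOrder := by simpa using hc
      simp [hs]

lemma pv_buckets_eq (xs : List (List (String × String))) :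
    pvKs.flatMap (fun k => xs.filter (fun t => pvKeyA t == k)) =
      pvTacticOrder.flatMap (fun tac => xs.filter (fun t => pvGetTactic t == some tac)) ++
        xs.filter pvUnknownTactic := by
  have hf : ∀ (tac : String) (i : Nat), PySem.List.index? pvTacticOrder tac = some i →
      xs.filter (fun t => (pvKeyA t == i : Bool)) =
        xs.filter (fun t => pvGetTactic t == some tac) := by
    intro tac i h
    exact List.filter_congr (fun t _ => pv_point tac i h t)
  simp only [pvKs, pvTacticOrder, List.flatMap_cons, List.flatMap_nil, List.append_nil]
  rw [hf "Initial Access" 0 (by decide), hf "Execution" 1 (by decide),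
    hf "Persistence" 2 (by decide), hf "Privilege Escalation" 3 (by decide),
    hf "Defense Evasion" 4 (by decide), hf "Credential Access" 5 (by decide),
    hf "Discovery" 6 (by decide), hf "Lateral Movement" 7 (by decide),
    hf "Collection" 8 (by decide), hf "Command and Control" 9 (by decide),
    hf "Exfiltration" 10 (by decide), hf "Impact" 11 (by decide),
    List.filter_congr (fun t _ => pv_point999 t)]
  simp [List.append_assoc]

-- ===== VERDICT (by name: the statement is the Claim_ definition above) =====
theorem generate_attack_narrative_py_spec : Claim_equal_generate_attack_narrative_py := by
  unfold Claim_equal_generate_attack_narrative_py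
  intro techniques _
  unfold Spec_generate_attack_narrative_py generate_attack_narrative_py generate_attack_narrative_py_alt
  by_cases h : techniques = []
  · simp [h]
  · simp only [h, if_false]
    rw [PySem.List.foldl_append_singleton_eq_map, List.nil_append]
    rw [pv_sorted_eq_buckets pvKeyA pvKs (by decide) techniques (fun x _ => pv_key_cov x)]
    rw [pv_buckets_eq, pvFmt_eq]
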